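-- pv_equiv track=rewrite | github.com/xtraspeed/whichlang | whichlang/whichlang.py | get_difference
-- ===== SOURCE A (Python) =====
-- PENALTY = 1250
--
-- def get_difference(input_ngram_ranks, language_model):
--     """[summary]
--
--     Args:
--         input_ngram_ranks ([dictionary]): [contains ngram and its frequency of input]
--         language_model ([dictionary]): [contains ngram and frequency of language train data]
--
--     Returns:
--         [int]: [score reflecting matching ngrams between input and language]
--     """
--     difference = 0
--     for ngram in input_ngram_ranks:
--         if ngram in language_model:
--             position_in_text = input_ngram_ranks[ngram]
--             position_in_language = language_model[ngram]
--             difference += abs(position_in_language - position_in_text)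
--         else:
--             difference += PENALTY
--     return difference
-- ===== SOURCE B (Python) =====
-- PENALTY = 1250
--
-- def get_difference(input_ngram_ranks, language_model):
--     """Sort-merge join: sort both key lists, walk them with two pointers,
--     start from a full penalty and refund PENALTY (plus the rank difference)
--     for every key the merge finds in both."""
--     a = sorted(input_ngram_ranks)
--     b = sorted(language_model)
--     total = PENALTY * len(a)
--     i = j = 0
--     while i < len(a) and j < len(b):
--         if a[i] < b[j]:
--             i += 1
--         elif b[j] < a[i]:
--             j += 1
--         else:
--             total += abs(language_model[b[j]] - input_ngram_ranks[a[i]]) - PENALTY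
--             i += 1
--             j += 1
--     return total
-- ===== Notes on version B (the rewrite author's own statement) =====
-- stated objective: alternative
-- what changed: Replaces A's per-key membership loop with a sort-merge join: both key lists are sorted and walked with two pointers, starting from a full bulk penalty and refunding PENALTY plus adding the rank difference at every merge match.
import Mathlib
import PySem

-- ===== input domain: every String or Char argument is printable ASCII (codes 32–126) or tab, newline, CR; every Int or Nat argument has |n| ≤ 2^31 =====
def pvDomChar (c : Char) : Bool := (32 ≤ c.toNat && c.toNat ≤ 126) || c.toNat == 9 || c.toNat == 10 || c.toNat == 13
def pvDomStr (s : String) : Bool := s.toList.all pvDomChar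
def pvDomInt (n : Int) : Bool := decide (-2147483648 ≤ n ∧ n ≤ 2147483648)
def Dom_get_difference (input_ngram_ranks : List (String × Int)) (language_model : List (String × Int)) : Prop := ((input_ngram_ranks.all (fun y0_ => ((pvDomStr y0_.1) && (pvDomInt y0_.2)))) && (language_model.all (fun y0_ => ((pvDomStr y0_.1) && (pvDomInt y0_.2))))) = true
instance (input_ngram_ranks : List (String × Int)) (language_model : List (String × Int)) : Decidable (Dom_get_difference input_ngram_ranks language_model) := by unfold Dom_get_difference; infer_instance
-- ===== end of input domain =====

-- B replaces A's per-key membership loop by a sort-merge join over the two sorted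
-- key lists with a bulk up-front penalty (objective: alternative algorithm; O(n log n)).


-- ===== PORT A =====
-- literal port: iterate the input dict's keys, branch on membership in the model
def get_difference (input_ngram_ranks : List (String × Int)) (language_model : List (String × Int)) : Int :=
  let d_in := PySem.Dict.ofList input_ngram_ranks
  let d_lm := PySem.Dict.ofList language_model
  d_in.keys.foldl (fun difference ngram =>
    if d_lm.contains ngram then
      difference + |d_lm.getD ngram 0 - d_in.getD ngram 0|
    else
      difference + 1250) 0

-- ===== PORT B =====
-- port of Source B: the while loop with pointers i, j becomes recursion on the two
-- list suffixes a[i:], b[j:] with the running total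
def mergeLoop (d_in d_lm : PySem.Dict String Int) : List String → List String → Int → Int
  | [], _, total => total
  | _ :: _, [], total => total
  | ai :: as_, bj :: bs, total =>
    if ai < bj then mergeLoop d_in d_lm as_ (bj :: bs) total
    else if bj < ai then mergeLoop d_in d_lm (ai :: as_) bs total
    else mergeLoop d_in d_lm as_ bs (total + (|d_lm.getD bj 0 - d_in.getD ai 0| - 1250))
termination_by la lb _ => la.length + lb.length

def get_difference_alt (input_ngram_ranks : List (String × Int)) (language_model : List (String × Int)) : Int :=
  let d_in := PySem.Dict.ofList input_ngram_ranks
  let d_lm := PySem.Dict.ofList language_model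
  let a := PySem.List.sorted d_in.keys (fun x => x) false
  let b := PySem.List.sorted d_lm.keys (fun x => x) false
  mergeLoop d_in d_lm a b (1250 * (a.length : Int))

-- ===== PRECONDITION & SPEC =====
def Spec_get_difference (input_ngram_ranks : List (String × Int)) (language_model : List (String × Int)) (out : Int) : Prop := out = get_difference_alt input_ngram_ranks language_model
instance (input_ngram_ranks : List (String × Int)) (language_model : List (String × Int)) (out : Int) : Decidable (Spec_get_difference input_ngram_ranks language_model out) := by unfold Spec_get_difference; infer_instance

-- ===== CLAIM =====
def Claim_equal_get_difference : Prop := ∀ (input_ngram_ranks : List (String × Int)) (language_model : List (String × Int)), Dom_get_difference input_ngram_ranks language_model → Spec_get_difference input_ngram_ranks language_model (get_difference input_ngram_ranks language_model)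

-- ===== LEMMAS AND PROOFS =====

-- A's one-pass fold over any key list splits into a matched sum plus a bulk penalty.
theorem pv_fold_split (p : String → Bool) (h : String → Int) (L : List String) (a : Int) :
    L.foldl (fun difference ngram =>
        if p ngram then difference + h ngram else difference + 1250) a
      = a + ((L.filter p).map h).sum + 1250 * ((L.length : Int) - ((L.filter p).length : Int)) := by
  induction L generalizing a with
  | nil => simp
  | cons x xs ih =>
    simp only [List.foldl_cons, List.filter_cons, List.length_cons]
    by_cases hp : p x = true
    · simp only [hp, if_true, ih, List.map_cons, List.sum_cons, List.length_cons]
      push_cast; ring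
    · simp only [hp, if_false, ih, Bool.false_eq_true]
      push_cast; ring

-- The merge loop on two strictly increasing lists computes, into the accumulator,
-- the sum over the common elements of (rank difference − PENALTY).
theorem pv_mergeLoop_eq (d_in d_lm : PySem.Dict String Int) :
    ∀ (la lb : List String) (t : Int), la.Pairwise (· < ·) → lb.Pairwise (· < ·) →
    mergeLoop d_in d_lm la lb t
      = t + ((la.filter (fun k => decide (k ∈ lb))).map
              (fun k => |d_lm.getD k 0 - d_in.getD k 0| - 1250)).sum
  | [], lb, t, _, _ => by simp [mergeLoop]
  | a :: as_, [], t, _, _ => by simp [mergeLoop]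
  | a :: as_, b :: bs, t, ha, hb => by
    have ha' := (List.pairwise_cons.mp ha).2
    have hah := (List.pairwise_cons.mp ha).1
    have hb' := (List.pairwise_cons.mp hb).2
    have hbh := (List.pairwise_cons.mp hb).1
    by_cases hab : a < b
    · have hnot : ¬ (a ∈ b :: bs) := by
        intro hm
        rcases List.mem_cons.mp hm with h | h
        · exact absurd (h ▸ hab) (lt_irrefl b)
        · exact absurd hab (not_lt.mpr (le_of_lt (hbh a h)))
      rw [mergeLoop, if_pos hab,
        pv_mergeLoop_eq d_in d_lm as_ (b :: bs) t ha' hb]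
      have hna : ((a :: as_).filter (fun k => decide (k ∈ b :: bs)))
          = (as_.filter (fun k => decide (k ∈ b :: bs))) := by
        rw [List.filter_cons]
        simp [hnot]
      rw [hna]
    · by_cases hba : b < a
      · have hfil : ∀ x ∈ a :: as_, (x ∈ b :: bs) ↔ (x ∈ bs) := by
          intro x hx
          have hax : a ≤ x := by
            rcases List.mem_cons.mp hx with h | h
            · exact le_of_eq h.symm
            · exact le_of_lt (hah x h)
          constructor
          · intro hm
            rcases List.mem_cons.mp hm with h | h
            · exfalso
              have hbx : b < x := lt_of_lt_of_le hba hax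
              rw [h] at hbx
              exact lt_irrefl b hbx
            · exact h
          · exact fun h => List.mem_cons_of_mem b h
        rw [mergeLoop, if_neg hab, if_pos hba,
          pv_mergeLoop_eq d_in d_lm (a :: as_) bs t ha hb']
        have hft : ((a :: as_).filter (fun k => decide (k ∈ b :: bs)))
            = ((a :: as_).filter (fun k => decide (k ∈ bs))) := by
          apply List.filter_congr
          intro x hx; simp [hfil x hx]
        rw [hft]
      · have heq : a = b := le_antisymm (not_lt.mp hba) (not_lt.mp hab)
        have hfil : ∀ x ∈ as_, (x ∈ a :: bs) ↔ (x ∈ bs) := by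
          intro x hx
          have hax : a < x := hah x hx
          constructor
          · intro hm
            rcases List.mem_cons.mp hm with h | h
            · exfalso; rw [h] at hax; exact lt_irrefl a hax
            · exact h
          · exact fun h => List.mem_cons_of_mem a h
        rw [mergeLoop, if_neg hab, if_neg hba,
          pv_mergeLoop_eq d_in d_lm as_ bs _ ha' hb', ← heq]
        have hmem : a ∈ a :: bs := List.mem_cons_self
        have hrest : (as_.filter (fun k => decide (k ∈ a :: bs)))
            = (as_.filter (fun k => decide (k ∈ bs))) := by
          apply List.filter_congr
          intro x hx; simp [hfil x hx]
        simp only [List.filter_cons, hmem, decide_true, if_true, List.map_cons,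
          List.sum_cons, hrest]
        ring
termination_by la lb _ => la.length + lb.length

-- sum of (f k − c) over a list
theorem pv_sum_map_sub (L : List String) (f : String → Int) (c : Int) :
    (L.map (fun k => f k - c)).sum = (L.map f).sum - c * (L.length : Int) := by
  induction L with
  | nil => simp
  | cons x xs ih => simp [ih]; ring

theorem get_difference_eq_alt (input_ngram_ranks language_model : List (String × Int)) :
    get_difference input_ngram_ranks language_model
      = get_difference_alt input_ngram_ranks language_model := by
  unfold get_difference get_difference_alt
  set d_in := PySem.Dict.ofList input_ngram_ranks with hdin
  set d_lm := PySem.Dict.ofList language_model with hdlm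
  set f : String → Int := fun k => |d_lm.getD k 0 - d_in.getD k 0| with hf
  have hnodup_in : d_in.keys.Nodup := PySem.Dict.nodup_keys_ofList input_ngram_ranks
  have hnodup_lm : d_lm.keys.Nodup := PySem.Dict.nodup_keys_ofList language_model
  have hsa : (PySem.List.sorted d_in.keys (fun x => x) false).Pairwise (· < ·) := by
    have h := PySem.Set.ofList_eq_self_of_nodup _ hnodup_in
    simpa [h] using PySem.List.sorted_ofList_pairwise_lt d_in.keys
  have hsb : (PySem.List.sorted d_lm.keys (fun x => x) false).Pairwise (· < ·) := by
    have h := PySem.Set.ofList_eq_self_of_nodup _ hnodup_lm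
    simpa [h] using PySem.List.sorted_ofList_pairwise_lt d_lm.keys
  rw [pv_mergeLoop_eq d_in d_lm _ _ _ hsa hsb,
    pv_fold_split (fun ngram => d_lm.contains ngram) f]
  -- membership in the sorted model keys is membership in the model dict
  have hpred : (PySem.List.sorted d_in.keys (fun x => x) false).filter
        (fun k => decide (k ∈ PySem.List.sorted d_lm.keys (fun x => x) false))
      = (PySem.List.sorted d_in.keys (fun x => x) false).filter
        (fun k => d_lm.contains k) := by
    apply List.filter_congr
    intro k _
    simp [PySem.List.mem_sorted, PySem.Dict.contains_eq_decide_mem_keys]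
  rw [hpred]
  -- the sorted filtered list is a permutation of the unsorted filtered list
  have hperm : ((PySem.List.sorted d_in.keys (fun x => x) false).filter
        (fun k => d_lm.contains k)).Perm (d_in.keys.filter (fun k => d_lm.contains k)) :=
    (PySem.List.sorted_perm d_in.keys (fun x => x) false).filter _
  have hlen : (PySem.List.sorted d_in.keys (fun x => x) false).length = d_in.keys.length :=
    (PySem.List.sorted_perm d_in.keys (fun x => x) false).length_eq
  rw [pv_sum_map_sub, (hperm.map _).sum_eq, hperm.length_eq, hlen]
  ring

-- ===== VERDICT =====
theorem get_difference_spec : Claim_equal_get_difference := by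
  intro inp lm _
  unfold Spec_get_difference
  exact get_difference_eq_alt inp lm
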